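-- pv_equiv track=rewrite | github.com/jack-maring/AdventOfCode21 | Day_20.py | convert
-- ===== SOURCE A (Python) =====
-- def convert(token):
--     binary=""
--     for t in token:
--         binary+="1" if t=="#" else "0"
--
--     count=0
--
--     for i in range(len(binary)-1, -1, -1):
--         count+=(2**(len(binary)-1-i))*int(binary[i])
--
--     return count
-- ===== SOURCE B (Python) =====
-- def convert(token):
--     count = 0
--     for t in token:
--         count = count * 2 + (1 if t == "#" else 0)
--     return count
-- ===== Notes on version B (the rewrite author's own statement) =====
-- stated objective: faster
-- what changed: Replaces A's intermediate binary string plus positional power-of-two summation with a single Horner-style fold (count = count*2 + bit) over the token, removing the quadratic string concatenation and per-digit exponentiation.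
import Mathlib
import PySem

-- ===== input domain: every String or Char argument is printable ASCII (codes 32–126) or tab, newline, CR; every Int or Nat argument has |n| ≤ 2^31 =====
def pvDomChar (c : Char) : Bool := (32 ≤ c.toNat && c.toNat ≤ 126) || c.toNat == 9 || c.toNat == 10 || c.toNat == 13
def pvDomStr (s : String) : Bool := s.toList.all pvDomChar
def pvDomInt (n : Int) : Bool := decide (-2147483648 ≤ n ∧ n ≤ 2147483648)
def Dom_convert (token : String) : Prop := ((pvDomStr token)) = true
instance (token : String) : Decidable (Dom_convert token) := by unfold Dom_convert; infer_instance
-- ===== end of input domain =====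

-- B replaces A's intermediate binary string and positional power-of-two sum with one Horner fold over the token (objective: faster, measured).

-- ===== PORT A =====
-- Python strings are ported through their char lists; int(binary[i]) (binary[i] ∈ {'0','1'})
-- is ported as 'if … = '1' then 1 else 0', exact on those digits.
def convert (token : String) : Int :=
  let binary : List Char :=
    token.toList.foldl (fun acc t => acc ++ [if t = '#' then '1' else '0']) []
  let n : Int := binary.length
  (PySem.List.pyRange (n - 1) (-1) (-1)).foldl
    (fun count i =>
      count + 2 ^ (n - 1 - i).toNat * (if PySem.List.pyGetD binary i ' ' = '1' then (1 : Int) else 0))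
    0

-- ===== PORT B =====
def convert_alt (token : String) : Int :=
  token.toList.foldl (fun count t => count * 2 + (if t = '#' then 1 else 0)) 0

-- ===== PRECONDITION & SPEC =====
def Spec_convert (token : String) (out : Int) : Prop := out = convert_alt token
instance (token : String) (out : Int) : Decidable (Spec_convert token out) := by unfold Spec_convert; infer_instance

-- ===== CLAIM (what is proved, stated in full; the proofs are below) =====
def Claim_equal_convert : Prop := ∀ (token : String), Dom_convert token → Spec_convert token (convert token)

-- ===== LEMMAS AND PROOFS =====

-- The positional power-of-two sum over the bit list equals the Horner fold.
theorem key (bs : List Int) :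
    (((List.range bs.length).map (fun k => 2 ^ (bs.length - 1 - k) * bs.getD k 0)).sum)
      = bs.foldl (fun c b => c * 2 + b) 0 := by
  induction bs using List.reverseRecOn with
  | nil => simp
  | append_singleton t x ih =>
    have hlen : (t ++ [x]).length = t.length + 1 := by simp
    rw [hlen, List.range_succ, List.map_append, List.sum_append, List.foldl_append]
    have h1 : (List.range t.length).map
        (fun k => 2 ^ (t.length + 1 - 1 - k) * (t ++ [x]).getD k 0)
        = (List.range t.length).map (fun k => 2 * (2 ^ (t.length - 1 - k) * t.getD k 0)) := by
      refine List.map_congr_left ?_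
      intro k hk
      rw [List.mem_range] at hk
      have hget : (t ++ [x]).getD k 0 = t.getD k 0 := by
        simp [List.getD, List.getElem?_append_left hk]
      have hexp : t.length + 1 - 1 - k = (t.length - 1 - k) + 1 := by omega
      rw [hget, hexp, pow_succ]
      ring
    rw [h1]
    have h2 : ((List.range t.length).map (fun k => 2 * (2 ^ (t.length - 1 - k) * t.getD k 0))).sum
        = 2 * ((List.range t.length).map (fun k => 2 ^ (t.length - 1 - k) * t.getD k 0)).sum := by
      rw [← List.sum_map_mul_left]
    rw [h2, ih]
    simp
    ring

theorem convert_eq (token : String) : convert token = convert_alt token := by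
  unfold convert convert_alt
  rw [PySem.List.foldl_append_singleton_eq_map]
  simp only [List.nil_append]
  set l := token.toList with hl
  set f : Char → Char := fun t => if t = '#' then '1' else '0' with hf
  set n : Int := ((l.map f).length : Int) with hn
  have hn' : n = (l.length : Int) := by simp [hn]
  -- turn the countdown fold into a sum over range
  rw [PySem.List.foldl_add]
  rw [PySem.List.pyRange_neg_one_eq_reverse]
  have h01 : (-1 : Int) + 1 = 0 := by norm_num
  rw [h01, List.map_reverse, List.sum_reverse, zero_add]
  have hsplit : n - 1 + 1 = n := by ring
  rw [hsplit]
  rw [PySem.List.pyRange_one]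
  have htn : (n - 0).toNat = l.length := by rw [hn']; omega
  rw [htn, List.map_map]
  have hterm : ∀ k ∈ List.range l.length,
      ((fun i => 2 ^ (n - 1 - i).toNat *
          (if PySem.List.pyGetD (l.map f) i ' ' = '1' then (1 : Int) else 0)) ∘ (fun k : ℕ => 0 + (k : Int))) k
      = (fun k : ℕ => 2 ^ (l.length - 1 - k) *
          ((l.map (fun t => if t = '#' then (1 : Int) else 0)).getD k 0)) k := by
    intro k hk
    rw [List.mem_range] at hk
    simp only [Function.comp_apply, zero_add]
    have hexp : (n - 1 - (k : Int)).toNat = l.length - 1 - k := by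
      rw [hn']; omega
    have hgetf : PySem.List.pyGetD (l.map f) (k : Int) ' ' = f l[k] := by
      rw [PySem.List.pyGetD_natCast]
      simp [List.getD, List.getElem?_map, (List.getElem?_eq_getElem (by simpa using hk))]
    have hbit : (l.map (fun t => if t = '#' then (1 : Int) else 0)).getD k 0
        = (if l[k] = '#' then (1 : Int) else 0) := by
      simp [List.getD, List.getElem?_map, (List.getElem?_eq_getElem (by simpa using hk))]
    rw [hexp, hgetf, hbit, hf]
    by_cases hc : l[k] = '#' <;> simp [hc]
  refine Eq.trans (congrArg List.sum (List.map_congr_left hterm)) ?_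
  have := key (l.map (fun t => if t = '#' then (1 : Int) else 0))
  rw [List.length_map] at this
  rw [this, List.foldl_map]

-- ===== VERDICT (by name: the statement is the Claim_ definition above) =====
theorem convert_spec : Claim_equal_convert := by
  intro token _
  unfold Spec_convert
  exact convert_eq token
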